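-- pv_equiv track=rewrite | github.com/tariqalagha1/Scraper-gold- | backend/app/scraper/robots_checker.py | _check_allowed
-- ===== SOURCE A (Python) =====
-- def _check_allowed(
--
--     robots_content: str,
--     path: str,
--     user_agent: str
-- ) -> bool:
--     """Check if path is allowed based on robots.txt rules.
--
--     Args:
--         robots_content: Content of robots.txt
--         path: URL path to check
--         user_agent: User agent to match
--
--     Returns:
--         True if allowed, False if disallowed
--     """
--     lines = robots_content.split("\n")
--     current_agent = None
--     rules_for_agent = []
--     rules_for_all = []
--
--     for line in lines:
--         line = line.strip().lower()
--
--         if line.startswith("user-agent:"):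
--             agent = line.split(":", 1)[1].strip()
--             current_agent = agent
--
--         elif line.startswith("disallow:"):
--             disallow_path = line.split(":", 1)[1].strip()
--             if current_agent == user_agent.lower():
--                 rules_for_agent.append(("disallow", disallow_path))
--             elif current_agent == "*":
--                 rules_for_all.append(("disallow", disallow_path))
--
--         elif line.startswith("allow:"):
--             allow_path = line.split(":", 1)[1].strip()
--             if current_agent == user_agent.lower():
--                 rules_for_agent.append(("allow", allow_path))
--             elif current_agent == "*":
--                 rules_for_all.append(("allow", allow_path))
--
--     # Use agent-specific rules if available, otherwise use wildcard
--     rules = rules_for_agent if rules_for_agent else rules_for_all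
--
--     # Check rules (longer paths take precedence)
--     rules.sort(key=lambda x: -len(x[1]))
--
--     for rule_type, rule_path in rules:
--         if path.startswith(rule_path) or rule_path == "/":
--             if rule_type == "disallow" and rule_path:
--                 return False
--             elif rule_type == "allow":
--                 return True
--
--     # Default to allowed
--     return True
-- ===== SOURCE B (Python) =====
-- def _check_allowed(
--
--     robots_content: str,
--     path: str,
--     user_agent: str
-- ) -> bool:
--     """Single pass: no rule lists, no sort; track the best (longest, earliest)
--     matching rule per agent group while parsing."""
--     ua = user_agent.lower()
--     current_agent = None
--     has_agent_rules = False
--     best_agent = None  # (len(rule_path), is_allow)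
--     best_all = None
--
--     for raw in robots_content.split("\n"):
--         line = raw.strip().lower()
--
--         if line.startswith("user-agent:"):
--             current_agent = line.split(":", 1)[1].strip()
--
--         elif line.startswith("disallow:") or line.startswith("allow:"):
--             is_allow = line.startswith("allow:")
--             rpath = line.split(":", 1)[1].strip()
--             if current_agent == ua:
--                 has_agent_rules = True
--                 which = 0
--             elif current_agent == "*":
--                 which = 1
--             else:
--                 continue
--             if (path.startswith(rpath) or rpath == "/") and (is_allow or rpath):
--                 cand = (len(rpath), is_allow)
--                 if which == 0:
--                     if best_agent is None or cand[0] > best_agent[0]: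
--                         best_agent = cand
--                 else:
--                     if best_all is None or cand[0] > best_all[0]:
--                         best_all = cand
--
--     best = best_agent if has_agent_rules else best_all
--     return True if best is None else best[1]
-- ===== Notes on version B (the rewrite author's own statement) =====
-- stated objective: alternative
-- what changed: Replaces A's build-rule-lists-then-stable-sort-then-first-match decision with a single parsing pass that tracks the best (longest, earliest-on-ties) triggering rule per agent group, never materialising or sorting rule lists.
import Mathlib
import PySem

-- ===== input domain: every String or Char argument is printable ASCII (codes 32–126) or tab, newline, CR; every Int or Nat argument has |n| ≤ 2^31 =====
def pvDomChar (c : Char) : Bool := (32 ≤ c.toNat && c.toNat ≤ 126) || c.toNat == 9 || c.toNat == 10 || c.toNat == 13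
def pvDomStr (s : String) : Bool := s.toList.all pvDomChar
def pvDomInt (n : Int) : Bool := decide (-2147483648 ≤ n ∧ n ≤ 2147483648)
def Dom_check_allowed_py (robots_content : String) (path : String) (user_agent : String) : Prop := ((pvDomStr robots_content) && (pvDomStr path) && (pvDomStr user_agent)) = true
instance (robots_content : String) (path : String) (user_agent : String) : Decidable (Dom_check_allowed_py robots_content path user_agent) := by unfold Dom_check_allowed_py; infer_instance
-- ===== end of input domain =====

-- B replaces A's build-lists / stable-sort / first-match decision by a single parsing pass
-- tracking the best (longest, earliest-on-ties) triggering rule per agent group (alternative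
-- decomposition, no speed claim). No mutation is observable by the caller.

-- ===== PORT A =====
-- the final 'for rule_type, rule_path in rules' loop of A (first triggering rule decides)
def pyA_decide (path : List Char) : List (String × List Char) → Bool
  | [] => true
  | (t, rp) :: rest =>
    if PySem.Chars.startswith path rp || rp == ['/'] then
      if t == "disallow" && !(rp == []) then false
      else if t == "allow" then true
      else pyA_decide path rest
    else pyA_decide path rest

-- one iteration of A's parsing loop; state = (current_agent, rules_for_agent, rules_for_all)
def pyA_step (ual : List Char)
    (st : Option (List Char) × List (String × List Char) × List (String × List Char))
    (raw : List Char) :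
    Option (List Char) × List (String × List Char) × List (String × List Char) :=
  let line := PySem.Chars.lower (PySem.Chars.strip raw)
  if PySem.Chars.startswith line "user-agent:".toList then
    (some (PySem.Chars.strip (PySem.List.pyGetD (PySem.Chars.splitOnMax line [':'] 1) 1 [])),
     st.2.1, st.2.2)
  else if PySem.Chars.startswith line "disallow:".toList then
    let dp := PySem.Chars.strip (PySem.List.pyGetD (PySem.Chars.splitOnMax line [':'] 1) 1 [])
    if st.1 == some ual then (st.1, st.2.1 ++ [("disallow", dp)], st.2.2)
    else if st.1 == some ['*'] then (st.1, st.2.1, st.2.2 ++ [("disallow", dp)])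
    else st
  else if PySem.Chars.startswith line "allow:".toList then
    let ap := PySem.Chars.strip (PySem.List.pyGetD (PySem.Chars.splitOnMax line [':'] 1) 1 [])
    if st.1 == some ual then (st.1, st.2.1 ++ [("allow", ap)], st.2.2)
    else if st.1 == some ['*'] then (st.1, st.2.1, st.2.2 ++ [("allow", ap)])
    else st
  else st

def check_allowed_py (robots_content : String) (path : String) (user_agent : String) : Bool :=
  let lines := PySem.Chars.splitOn robots_content.toList ['\n']
  let st := lines.foldl (pyA_step (PySem.Chars.lower user_agent.toList)) (none, [], [])
  let rules := if st.2.1.isEmpty then st.2.2 else st.2.1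
  pyA_decide path.toList (PySem.List.sorted rules (fun x => -(x.2.length : Int)) false)

-- ===== PORT B =====
-- B's candidate update: keep the longest triggering rule, earliest on ties (strict '>')
def pyB_upd (path : List Char) (best : Option (Nat × Bool)) (isAllow : Bool) (rp : List Char) :
    Option (Nat × Bool) :=
  if (PySem.Chars.startswith path rp || rp == ['/']) && (isAllow || !(rp == [])) then
    match best with
    | none => some (rp.length, isAllow)
    | some (l, b) => if l < rp.length then some (rp.length, isAllow) else some (l, b)
  else best

-- one iteration of B's single pass; state = (current_agent, has_agent_rules, best_agent, best_all)
def pyB_step (ual path : List Char)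
    (st : Option (List Char) × Bool × Option (Nat × Bool) × Option (Nat × Bool))
    (raw : List Char) :
    Option (List Char) × Bool × Option (Nat × Bool) × Option (Nat × Bool) :=
  let line := PySem.Chars.lower (PySem.Chars.strip raw)
  if PySem.Chars.startswith line "user-agent:".toList then
    (some (PySem.Chars.strip (PySem.List.pyGetD (PySem.Chars.splitOnMax line [':'] 1) 1 [])), st.2)
  else if PySem.Chars.startswith line "disallow:".toList || PySem.Chars.startswith line "allow:".toList then
    let isAllow := PySem.Chars.startswith line "allow:".toList
    let rp := PySem.Chars.strip (PySem.List.pyGetD (PySem.Chars.splitOnMax line [':'] 1) 1 [])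
    if st.1 == some ual then (st.1, true, pyB_upd path st.2.2.1 isAllow rp, st.2.2.2)
    else if st.1 == some ['*'] then (st.1, st.2.1, st.2.2.1, pyB_upd path st.2.2.2 isAllow rp)
    else st
  else st

def check_allowed_py_alt (robots_content : String) (path : String) (user_agent : String) : Bool :=
  let st := (PySem.Chars.splitOn robots_content.toList ['\n']).foldl
    (pyB_step (PySem.Chars.lower user_agent.toList) path.toList) (none, false, none, none)
  match (if st.2.1 then st.2.2.1 else st.2.2.2) with
  | none => true
  | some (_, b) => b

-- ===== PRECONDITION & SPEC =====
def Spec_check_allowed_py (robots_content : String) (path : String) (user_agent : String) (out : Bool) : Prop := out = check_allowed_py_alt robots_content path user_agent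
instance (robots_content : String) (path : String) (user_agent : String) (out : Bool) : Decidable (Spec_check_allowed_py robots_content path user_agent out) := by unfold Spec_check_allowed_py; infer_instance

-- ===== CLAIM (what is proved, stated in full; the proofs are below) =====
def Claim_equal_check_allowed_py : Prop := ∀ (robots_content : String) (path : String) (user_agent : String), Dom_check_allowed_py robots_content path user_agent → Spec_check_allowed_py robots_content path user_agent (check_allowed_py robots_content path user_agent)

-- ===== LEMMAS AND PROOFS =====

-- a rule triggers A's loop: its condition holds and it is not an empty disallow
def candA (path : List Char) (r : String × List Char) : Bool :=
  (PySem.Chars.startswith path r.2 || r.2 == ['/']) && (r.1 == "allow" || !(r.2 == []))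

-- first-best update on raw rules (spec-level counterpart of pyB_upd)
def fbUpd (path : List Char) (b : Option (String × List Char)) (r : String × List Char) :
    Option (String × List Char) :=
  if candA path r then
    match b with
    | none => some r
    | some r' => if r'.2.length < r.2.length then some r else some r'
  else b

def firstBest (path : List Char) (rs : List (String × List Char)) : Option (String × List Char) :=
  rs.foldl (fbUpd path) none

def bmap (b : Option (String × List Char)) : Option (Nat × Bool) :=
  b.map (fun r => (r.2.length, r.1 == "allow"))

def TypesOk (rs : List (String × List Char)) : Prop :=
  ∀ r ∈ rs, r.1 = "allow" ∨ r.1 = "disallow"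

theorem pyA_decide_eq_find (path : List Char) (l : List (String × List Char)) (h : TypesOk l) :
    pyA_decide path l = (match l.find? (candA path) with
      | none => true
      | some r => r.1 == "allow") := by
  induction l with
  | nil => rfl
  | cons r rest ih =>
    obtain ⟨t, rp⟩ := r
    have ht := h (t, rp) (List.mem_cons_self ..)
    have hrest : TypesOk rest := fun r hr => h r (List.mem_cons_of_mem _ hr)
    rw [List.find?_cons]
    cases hcond : (PySem.Chars.startswith path rp || rp == ['/']) with
    | false =>
      have : candA path (t, rp) = false := by simp [candA, hcond]
      simp only [pyA_decide, hcond, Bool.false_eq_true, if_false, this]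
      exact ih hrest
    | true =>
      rcases ht with ht | ht <;> subst ht
      · have : candA path ("allow", rp) = true := by simp [candA, hcond]
        simp [pyA_decide, hcond, this]
      · by_cases hrp : rp = []
        · subst hrp
          have : candA path ("disallow", ([] : List Char)) = false := by simp [candA]
          simp only [pyA_decide, hcond, if_true, this]
          simpa using ih hrest
        · have : candA path ("disallow", rp) = true := by simp [candA, hcond, hrp]
          simp [pyA_decide, hcond, this, hrp]

theorem find?_insertBy (path : List Char) (x : String × List Char) (l : List (String × List Char))
    (hl : l.Pairwise (fun a b => -(a.2.length : Int) ≤ -(b.2.length : Int))) :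
    (PySem.List.insertBy (fun a b => decide (-(a.2.length : Int) < -(b.2.length : Int))) x l).find?
      (candA path) = fbUpd path (l.find? (candA path)) x := by
  induction l with
  | nil =>
    simp only [PySem.List.insertBy, List.find?_nil, fbUpd, List.find?_cons]
    cases hcx : candA path x <;> simp
  | cons y ys ih =>
    rw [List.pairwise_cons] at hl
    obtain ⟨hy, htl⟩ := hl
    have hbe : (decide (-(x.2.length : Int) < -(y.2.length : Int)))
        = decide (y.2.length < x.2.length) := by
      simp only [decide_eq_decide]; omega
    simp only [PySem.List.insertBy, hbe]
    by_cases hb : y.2.length < x.2.length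
    · simp only [hb, decide_true, if_true]
      cases hcx : candA path x with
      | false =>
        rw [List.find?_cons_of_neg (by simp [hcx])]
        simp [fbUpd, hcx]
      | true =>
        rw [List.find?_cons_of_pos hcx]
        cases hfy : List.find? (candA path) (y :: ys) with
        | none => simp [fbUpd, hcx]
        | some r' =>
          have hmem := List.mem_of_find?_eq_some hfy
          have hkey : -(y.2.length : Int) ≤ -(r'.2.length : Int) := by
            rcases List.mem_cons.mp hmem with h | h
            · subst h; omega
            · exact hy r' h
          have hlt : r'.2.length < x.2.length := by omega
          simp [fbUpd, hcx, hlt]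
    · simp only [hb, decide_false, Bool.false_eq_true, if_false]
      cases hcy : candA path y with
      | true =>
        simp only [List.find?_cons_of_pos hcy]
        simp only [fbUpd]
        cases hcx : candA path x <;> simp [hb]
      | false =>
        simp only [List.find?_cons_of_neg (by simp [hcy] : ¬ candA path y = true)]
        exact ih htl

theorem find?_sorted (path : List Char) (rs : List (String × List Char)) :
    (PySem.List.sorted rs (fun x => -(x.2.length : Int)) false).find? (candA path)
      = firstBest path rs := by
  induction rs using List.reverseRecOn with
  | nil => rfl
  | append_singleton rs x ih =>
    have hs : PySem.List.sorted (rs ++ [x]) (fun r => -(r.2.length : Int)) false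
        = PySem.List.insertBy (fun a b => decide (-(a.2.length : Int) < -(b.2.length : Int))) x
            (PySem.List.sorted rs (fun r => -(r.2.length : Int)) false) := by
      rw [PySem.List.sorted_eq_foldl_insertBy, PySem.List.sorted_eq_foldl_insertBy,
        List.foldl_append]
      rfl
    rw [hs, find?_insertBy path x _ (PySem.List.sorted_pairwise rs (fun r => -(r.2.length : Int))),
      ih, firstBest, firstBest, List.foldl_append]
    rfl

theorem pyB_upd_bmap (path : List Char) (b : Option (String × List Char)) (r : String × List Char) :
    pyB_upd path (bmap b) (r.1 == "allow") r.2 = bmap (fbUpd path b r) := by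
  cases b with
  | none => simp only [bmap, Option.map_none, pyB_upd, fbUpd, candA]; split_ifs <;> simp
  | some r' =>
    simp only [bmap, Option.map_some, pyB_upd, fbUpd, candA]
    split_ifs <;> simp_all

theorem firstBest_append (path : List Char) (rs : List (String × List Char))
    (r : String × List Char) :
    firstBest path (rs ++ [r]) = fbUpd path (firstBest path rs) r := by
  rw [firstBest, firstBest, List.foldl_append]
  rfl

theorem typesOk_append (rs : List (String × List Char)) (r : String × List Char)
    (h : TypesOk rs) (hr : r.1 = "allow" ∨ r.1 = "disallow") : TypesOk (rs ++ [r]) := by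
  intro q hq
  rcases List.mem_append.mp hq with hq | hq
  · exact h q hq
  · rcases List.mem_singleton.mp hq with rfl; exact hr

def StInv (path : List Char)
    (sA : Option (List Char) × List (String × List Char) × List (String × List Char))
    (sB : Option (List Char) × Bool × Option (Nat × Bool) × Option (Nat × Bool)) : Prop :=
  sB.1 = sA.1 ∧ sB.2.1 = !sA.2.1.isEmpty ∧ sB.2.2.1 = bmap (firstBest path sA.2.1) ∧
    sB.2.2.2 = bmap (firstBest path sA.2.2) ∧ TypesOk sA.2.1 ∧ TypesOk sA.2.2

theorem not_allow_of_disallow (line : List Char)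
    (h : PySem.Chars.startswith line "disallow:".toList = true) :
    PySem.Chars.startswith line "allow:".toList = false := by
  by_contra hne
  have ha : PySem.Chars.startswith line "allow:".toList = true := by
    cases hx : PySem.Chars.startswith line "allow:".toList
    · exact absurd hx hne
    · rfl
  have h1 := (PySem.Chars.startswith_iff line "disallow:".toList).mp h
  have h2 := (PySem.Chars.startswith_iff line "allow:".toList).mp ha
  rcases List.prefix_or_prefix_of_prefix h1 h2 with hp | hp
  · exact absurd hp (by decide)
  · exact absurd hp (by decide)

theorem step_inv (ual path : List Char) (raw : List Char) (sA : Option (List Char) × List (String × List Char) × List (String × List Char))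
    (sB : Option (List Char) × Bool × Option (Nat × Bool) × Option (Nat × Bool)) (h : StInv path sA sB) :
    StInv path (pyA_step ual sA raw) (pyB_step ual path sB raw) := by
  obtain ⟨h1, h2, h3, h4, h5, h6⟩ := h
  simp only [pyA_step, pyB_step, h1]
  by_cases hu : PySem.Chars.startswith (PySem.Chars.lower (PySem.Chars.strip raw))
      "user-agent:".toList = true
  · simp only [hu, if_true]
    exact ⟨rfl, h2, h3, h4, h5, h6⟩
  · simp only [if_neg hu]
    by_cases hd : PySem.Chars.startswith (PySem.Chars.lower (PySem.Chars.strip raw))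
        "disallow:".toList = true
    · have ha := not_allow_of_disallow _ hd
      simp only [hd, ha, if_true, Bool.true_or]
      by_cases hag : (sA.1 == some ual) = true
      · simp only [hag, if_true]
        refine ⟨rfl, by simp, ?_, h4, typesOk_append _ _ h5 (Or.inr rfl), h6⟩
        rw [h3, firstBest_append]
        have hb := pyB_upd_bmap path (firstBest path sA.2.1)
          ("disallow", PySem.Chars.strip (PySem.List.pyGetD
            (PySem.Chars.splitOnMax (PySem.Chars.lower (PySem.Chars.strip raw)) [':'] 1) 1 []))
        simpa using hb
      · simp only [if_neg hag]
        by_cases hst : (sA.1 == some ['*']) = true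
        · simp only [hst, if_true]
          refine ⟨rfl, h2, h3, ?_, h5, typesOk_append _ _ h6 (Or.inr rfl)⟩
          rw [h4, firstBest_append]
          have hb := pyB_upd_bmap path (firstBest path sA.2.2)
            ("disallow", PySem.Chars.strip (PySem.List.pyGetD
              (PySem.Chars.splitOnMax (PySem.Chars.lower (PySem.Chars.strip raw)) [':'] 1) 1 []))
          simpa using hb
        · simp only [if_neg hst]
          exact ⟨h1, h2, h3, h4, h5, h6⟩
    · simp only [if_neg hd]
      by_cases hal : PySem.Chars.startswith (PySem.Chars.lower (PySem.Chars.strip raw))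
          "allow:".toList = true
      · have hd' : PySem.Chars.startswith (PySem.Chars.lower (PySem.Chars.strip raw))
            "disallow:".toList = false := by
          cases hx : PySem.Chars.startswith (PySem.Chars.lower (PySem.Chars.strip raw))
            "disallow:".toList
          · rfl
          · exact absurd hx hd
        simp only [hal, hd', Bool.false_or, if_true]
        by_cases hag : (sA.1 == some ual) = true
        · simp only [hag, if_true]
          refine ⟨rfl, by simp, ?_, h4, typesOk_append _ _ h5 (Or.inl rfl), h6⟩
          rw [h3, firstBest_append]
          have hb := pyB_upd_bmap path (firstBest path sA.2.1)
            ("allow", PySem.Chars.strip (PySem.List.pyGetD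
              (PySem.Chars.splitOnMax (PySem.Chars.lower (PySem.Chars.strip raw)) [':'] 1) 1 []))
          simpa using hb
        · simp only [if_neg hag]
          by_cases hst : (sA.1 == some ['*']) = true
          · simp only [hst, if_true]
            refine ⟨rfl, h2, h3, ?_, h5, typesOk_append _ _ h6 (Or.inl rfl)⟩
            rw [h4, firstBest_append]
            have hb := pyB_upd_bmap path (firstBest path sA.2.2)
              ("allow", PySem.Chars.strip (PySem.List.pyGetD
                (PySem.Chars.splitOnMax (PySem.Chars.lower (PySem.Chars.strip raw)) [':'] 1) 1 []))
            simpa using hb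
          · simp only [if_neg hst]
            exact ⟨h1, h2, h3, h4, h5, h6⟩
      · have hd' : PySem.Chars.startswith (PySem.Chars.lower (PySem.Chars.strip raw))
            "disallow:".toList = false := by
          cases hx : PySem.Chars.startswith (PySem.Chars.lower (PySem.Chars.strip raw))
            "disallow:".toList
          · rfl
          · exact absurd hx hd
        have ha' : PySem.Chars.startswith (PySem.Chars.lower (PySem.Chars.strip raw))
            "allow:".toList = false := by
          cases hx : PySem.Chars.startswith (PySem.Chars.lower (PySem.Chars.strip raw))
            "allow:".toList
          · rfl
          · exact absurd hx hal
        simp only [hd', ha', Bool.or_false, Bool.false_eq_true, if_false]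
        exact ⟨h1, h2, h3, h4, h5, h6⟩

theorem fold_inv (ual path : List Char) (lines : List (List Char)) (sA : Option (List Char) × List (String × List Char) × List (String × List Char))
    (sB : Option (List Char) × Bool × Option (Nat × Bool) × Option (Nat × Bool)) (h : StInv path sA sB) :
    StInv path (lines.foldl (pyA_step ual) sA) (lines.foldl (pyB_step ual path) sB) := by
  induction lines generalizing sA sB with
  | nil => exact h
  | cons raw rest ih => exact ih _ _ (step_inv ual path raw sA sB h)

theorem main_eq (lines : List (List Char)) (ual path : List Char) :
    (let st := lines.foldl (pyA_step ual) (none, [], []);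
     let rules := if st.2.1.isEmpty then st.2.2 else st.2.1;
     pyA_decide path (PySem.List.sorted rules (fun x => -(x.2.length : Int)) false))
    = (let st := lines.foldl (pyB_step ual path) (none, false, none, none);
       match (if st.2.1 then st.2.2.1 else st.2.2.2) with
       | none => true
       | some (_, b) => b) := by
  obtain ⟨h1, h2, h3, h4, h5, h6⟩ := fold_inv ual path lines (none, [], [])
    (none, false, none, none)
    (by unfold StInv TypesOk; refine ⟨rfl, rfl, rfl, rfl, ?_, ?_⟩ <;> intro r h <;> cases h)
  simp only []
  set stA := lines.foldl (pyA_step ual) (none, [], []) with hstA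
  set stB := lines.foldl (pyB_step ual path) (none, false, none, none) with hstB
  have hrT : TypesOk (if stA.2.1.isEmpty then stA.2.2 else stA.2.1) := by
    split_ifs
    · exact h6
    · exact h5
  rw [pyA_decide_eq_find path _
    (fun r hr => hrT r ((PySem.List.sorted_perm _ _ _).subset hr)), find?_sorted]
  rw [h2, h3, h4]
  cases hE : stA.2.1.isEmpty with
  | true =>
    simp only [if_true, Bool.not_true, Bool.false_eq_true, if_false]
    cases firstBest path stA.2.2 <;> rfl
  | false =>
    simp only [Bool.false_eq_true, if_false, Bool.not_false, if_true]
    cases firstBest path stA.2.1 <;> rfl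

-- ===== VERDICT (by name: the statement is the Claim_ definition above) =====
theorem check_allowed_py_spec : Claim_equal_check_allowed_py := by
  intro robots_content path user_agent _
  show check_allowed_py robots_content path user_agent
    = check_allowed_py_alt robots_content path user_agent
  simpa only [check_allowed_py, check_allowed_py_alt] using
    main_eq (PySem.Chars.splitOn robots_content.toList ['\n'])
      (PySem.Chars.lower user_agent.toList) path.toList
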